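-- pv_equiv track=rewrite | github.com/jordanhubbard/Theseus | cleanroom/python/theseus_re/__init__.py | _match_char_class
-- ===== SOURCE A (Python) =====
-- def _match_char_class(atom, char):
--     """
--     Match char against a character class like [abc], [^abc], [a-z], etc.
--     atom includes the surrounding brackets.
--     """
--     # atom is like [abc] or [^abc] or [a-z0-9]
--     i = 1  # skip '['
--     negate = False
--     if i < len(atom) - 1 and atom[i] == '^':
--         negate = True
--         i += 1
--
--     matched = False
--     while i < len(atom) - 1:  # -1 to skip ']'
--         # Check for range like a-z
--         if i + 2 < len(atom) - 1 and atom[i + 1] == '-':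
--             # Range
--             start_c = atom[i]
--             end_c = atom[i + 2]
--             if start_c <= char <= end_c:
--                 matched = True
--             i += 3
--         elif atom[i] == '\\' and i + 1 < len(atom) - 1:
--             # Escape sequence inside class
--             esc = atom[i:i+2]
--             if esc == '\\d':
--                 if char.isdigit():
--                     matched = True
--             elif esc == '\\w':
--                 if char.isalnum() or char == '_':
--                     matched = True
--             elif esc == '\\s':
--                 if char in ' \t\n\r\f\v':
--                     matched = True
--             else:
--                 if atom[i+1] == char:
--                     matched = True
--             i += 2
--         else:
--             if atom[i] == char:
--                 matched = True
--             i += 1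
--
--     if negate:
--         return not matched
--     return matched
-- ===== SOURCE B (Python) =====
-- def _match_char_class(atom, char):
--     # Two-phase: tokenize the class body once, then test char against each token.
--     body = atom[1:-1]
--     if body.startswith('^'):
--         return not _any_token_matches(_tokenize(body[1:]), char)
--     return _any_token_matches(_tokenize(body), char)
--
--
-- def _tokenize(body):
--     tokens = []
--     j = 0
--     n = len(body)
--     while j < n:
--         if j + 2 < n and body[j + 1] == '-':
--             tokens.append(('range', body[j], body[j + 2]))
--             j += 3
--         elif body[j] == '\\' and j + 1 < n:
--             tokens.append(('esc', body[j + 1]))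
--             j += 2
--         else:
--             tokens.append(('lit', body[j]))
--             j += 1
--     return tokens
--
--
-- def _any_token_matches(tokens, char):
--     return any(_token_matches(t, char) for t in tokens)
--
--
-- def _token_matches(tok, char):
--     kind = tok[0]
--     if kind == 'range':
--         return tok[1] <= char <= tok[2]
--     c = tok[1]
--     if kind == 'esc':
--         if c == 'd':
--             return char.isdigit()
--         if c == 'w':
--             return char.isalnum() or char == '_'
--         if c == 's':
--             return char in ' \t\n\r\f\v'
--         return char == c
--     return char == c
-- ===== Notes on version B (the rewrite author's own statement) =====
-- stated objective: alternative
-- what changed: A walks the atom once with an index and a mutable matched flag, deciding and testing each element in the same loop; B first slices out the class body, strips the optional '^', tokenizes it into range/escape/literal tokens, and then separately computes the match as any() of per-token predicates.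
import Mathlib
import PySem

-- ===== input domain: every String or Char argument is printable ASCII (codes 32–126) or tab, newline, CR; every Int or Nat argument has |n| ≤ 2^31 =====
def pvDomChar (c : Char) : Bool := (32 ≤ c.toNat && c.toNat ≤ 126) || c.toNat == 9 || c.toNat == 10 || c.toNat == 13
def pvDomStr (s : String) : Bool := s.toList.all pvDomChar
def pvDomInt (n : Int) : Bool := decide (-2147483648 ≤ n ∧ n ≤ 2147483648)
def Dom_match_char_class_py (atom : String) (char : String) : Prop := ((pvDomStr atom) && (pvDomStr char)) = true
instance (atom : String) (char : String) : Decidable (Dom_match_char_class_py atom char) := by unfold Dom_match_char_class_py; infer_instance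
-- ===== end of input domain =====

-- B restructures A's single index-walk-with-mutable-flag into two phases: tokenize the
-- class body once into range/escape/literal tokens, then any() over per-token predicates
-- (objective: alternative decomposition, same cost).

-- Python str `<=` (lexicographic by code point = Lean's ≤ on List Char, per PYSEM)
def pyLe (s t : List Char) : Bool := decide (s ≤ t)

-- the literal ' \t\n\r\f\v' from A's source
def pyWhitespace : List Char := [' ', '\t', '\n', '\r', Char.ofNat 12, Char.ofNat 11]

-- ===== PORT A =====
-- A's while loop: index i into atom, flag `matched`; Python's guard `i < len-1` is
-- written `i+1 < len` (equal for all values), likewise `i+2 < len-1` as `i+3 < len`;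
-- `atom[i:i+2]` is `(cs.drop i).take 2`, `atom[j]` (j in range) is `cs.getD j ' '`.
def matchClassLoop (cs ch : List Char) (i : Nat) (matched : Bool) : Bool :=
  if i + 1 < cs.length then
    if i + 3 < cs.length ∧ cs.getD (i+1) ' ' = '-' then
      matchClassLoop cs ch (i+3)
        (if pyLe [cs.getD i ' '] ch ∧ pyLe ch [cs.getD (i+2) ' '] then true else matched)
    else if cs.getD i ' ' = '\\' ∧ i + 2 < cs.length then
      matchClassLoop cs ch (i+2)
        (if (cs.drop i).take 2 = ['\\', 'd'] then (if PySem.Chars.strIsdigit ch then true else matched)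
         else if (cs.drop i).take 2 = ['\\', 'w'] then (if PySem.Chars.strIsalnum ch ∨ ch = ['_'] then true else matched)
         else if (cs.drop i).take 2 = ['\\', 's'] then (if PySem.Chars.isIn ch pyWhitespace then true else matched)
         else (if [cs.getD (i+1) ' '] = ch then true else matched))
    else
      matchClassLoop cs ch (i+1) (if [cs.getD i ' '] = ch then true else matched)
  else matched
termination_by cs.length - i

def match_char_class_py (atom : String) (char : String) : Bool :=
  if 2 < atom.toList.length ∧ atom.toList.getD 1 ' ' = '^' then  -- `1 < len-1 and atom[1] == '^'`
    !(matchClassLoop atom.toList char.toList 2 false)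
  else
    matchClassLoop atom.toList char.toList 1 false

-- ===== PORT B =====
inductive ClassTok where
  | range : Char → Char → ClassTok
  | esc   : Char → ClassTok
  | lit   : Char → ClassTok
deriving DecidableEq, Repr

def tokenize : List Char → List ClassTok
  | c :: '-' :: d :: rest => ClassTok.range c d :: tokenize rest
  | '\\' :: e :: rest => ClassTok.esc e :: tokenize rest
  | c :: rest => ClassTok.lit c :: tokenize rest
  | [] => []

def tokMatches (ch : List Char) : ClassTok → Bool
  | ClassTok.range c d => pyLe [c] ch && pyLe ch [d]
  | ClassTok.esc e =>
      if e = 'd' then PySem.Chars.strIsdigit ch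
      else if e = 'w' then (PySem.Chars.strIsalnum ch || ch == ['_'])
      else if e = 's' then PySem.Chars.isIn ch pyWhitespace
      else ch == [e]
  | ClassTok.lit c => ch == [c]

def match_char_class_py_alt (atom : String) (char : String) : Bool :=
  let body := (atom.toList.drop 1).dropLast     -- atom[1:-1]
  let ch := char.toList
  if PySem.Chars.startswith body ['^'] then
    !((tokenize (body.drop 1)).any (tokMatches ch))
  else
    (tokenize body).any (tokMatches ch)

-- ===== PRECONDITION & SPEC =====
def Spec_match_char_class_py (atom : String) (char : String) (out : Bool) : Prop := out = match_char_class_py_alt atom char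
instance (atom : String) (char : String) (out : Bool) : Decidable (Spec_match_char_class_py atom char out) := by unfold Spec_match_char_class_py; infer_instance

-- ===== CLAIM (what is proved, stated in full; the proofs are below) =====
def Claim_equal_match_char_class_py : Prop := ∀ (atom : String) (char : String), Dom_match_char_class_py atom char → Spec_match_char_class_py atom char (match_char_class_py atom char)

-- ===== LEMMAS AND PROOFS =====
theorem range_step (c d : Char) (ch : List Char) (m X : Bool) :
    ((if pyLe [c] ch ∧ pyLe ch [d] then true else m) || X)
      = (m || (tokMatches ch (ClassTok.range c d) || X)) := by
  simp only [tokMatches]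
  cases pyLe [c] ch <;> cases pyLe ch [d] <;> cases m <;> simp

theorem esc_step (e : Char) (ch : List Char) (m X : Bool) :
    ((if ['\\', e] = ['\\', 'd'] then (if PySem.Chars.strIsdigit ch then true else m)
      else if ['\\', e] = ['\\', 'w'] then (if PySem.Chars.strIsalnum ch ∨ ch = ['_'] then true else m)
      else if ['\\', e] = ['\\', 's'] then (if PySem.Chars.isIn ch pyWhitespace then true else m)
      else (if [e] = ch then true else m)) || X)
      = (m || (tokMatches ch (ClassTok.esc e) || X)) := by
  by_cases hd : e = 'd'
  · subst hd
    cases h : PySem.Chars.strIsdigit ch <;> cases m <;> simp [tokMatches, h]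
  · by_cases hw : e = 'w'
    · subst hw
      by_cases ha : PySem.Chars.strIsalnum ch = true ∨ ch = ['_']
      · rcases ha with h | h <;> cases m <;> simp [tokMatches, h]
      · have h1 : PySem.Chars.strIsalnum ch = false := by
          cases hh : PySem.Chars.strIsalnum ch
          · rfl
          · exact absurd (Or.inl hh) ha
        have h2 : ch ≠ ['_'] := fun hh => ha (Or.inr hh)
        cases m <;> simp [tokMatches, h1, h2]
    · by_cases hs : e = 's'
      · subst hs
        cases h : PySem.Chars.isIn ch pyWhitespace <;> cases m <;> simp [tokMatches, h]
      · rcases eq_or_ne ch [e] with h | h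
        · subst h
          cases m <;> simp [tokMatches, hd, hw, hs]
        · cases m <;> simp [tokMatches, hd, hw, hs, h, Ne.symm h]

theorem lit_step (c : Char) (ch : List Char) (m X : Bool) :
    ((if [c] = ch then true else m) || X)
      = (m || (tokMatches ch (ClassTok.lit c) || X)) := by
  simp only [tokMatches]
  rcases eq_or_ne ch [c] with h | h
  · subst h
    cases m <;> simp
  · rw [if_neg (Ne.symm h)]
    cases m <;> simp [h]

theorem loop_eq_any (cs ch : List Char) (i : Nat) (m : Bool) :
    matchClassLoop cs ch i m = (m || (tokenize (cs.dropLast.drop i)).any (tokMatches ch)) := by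
  have hdl : cs.dropLast.length = cs.length - 1 := by simp
  fun_induction matchClassLoop cs ch i m with
  | case1 i m h1 h2 ih =>
    simp only [dite_eq_ite] at ih
    obtain ⟨h3, h4⟩ := h2
    have hi0 : i < cs.dropLast.length := by omega
    have hi1 : i + 1 < cs.dropLast.length := by omega
    have hi2 : i + 2 < cs.dropLast.length := by omega
    rw [List.getD_eq_getElem _ _ (show i + 1 < cs.length by omega)] at h4
    rw [ih, List.drop_eq_getElem_cons hi0, List.drop_eq_getElem_cons hi1,
        List.drop_eq_getElem_cons hi2]
    simp only [List.getElem_dropLast]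
    rw [h4, tokenize.eq_1,
        List.getD_eq_getElem _ _ (show i < cs.length by omega),
        List.getD_eq_getElem _ _ (show i + 2 < cs.length by omega)]
    simp only [List.any_cons]
    rw [range_step]
  | case2 i m h1 hn h2 ih =>
    simp only [dite_eq_ite] at ih
    obtain ⟨hbs, hlen⟩ := h2
    have hi0 : i < cs.dropLast.length := by omega
    have hi1 : i + 1 < cs.dropLast.length := by omega
    rw [List.getD_eq_getElem _ _ (show i < cs.length by omega)] at hbs
    have hslice : (cs.drop i).take 2 = [cs[i]'(by omega), cs[i + 1]'(by omega)] := by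
      rw [List.drop_eq_getElem_cons (show i < cs.length by omega)]
      rw [List.drop_eq_getElem_cons (show i + 1 < cs.length by omega)]
      rfl
    rw [ih, hslice, hbs,
        List.getD_eq_getElem _ _ (show i + 1 < cs.length by omega),
        List.drop_eq_getElem_cons hi0, List.drop_eq_getElem_cons hi1]
    simp only [List.getElem_dropLast]
    rw [hbs]
    have htok : tokenize ('\\' :: cs[i + 1]'(by omega) :: cs.dropLast.drop (i + 2))
        = ClassTok.esc (cs[i + 1]'(by omega)) :: tokenize (cs.dropLast.drop (i + 2)) := by
      by_cases hda : cs[i + 1]'(by omega) = '-'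
      · have hrest : cs.dropLast.drop (i + 2) = [] := by
          apply List.drop_eq_nil_of_le
          by_contra hc
          exact hn ⟨by omega,
            by rw [List.getD_eq_getElem _ _ (show i + 1 < cs.length by omega)]; exact hda⟩
        rw [hda, hrest]
        simp [tokenize]
      · exact tokenize.eq_2 _ _ (fun d r hd _ => hda hd)
    rw [htok]
    simp only [List.any_cons]
    rw [esc_step]
  | case3 i m h1 hn2 hn3 ih =>
    simp only [dite_eq_ite] at ih
    have hi0 : i < cs.dropLast.length := by omega
    rw [ih, List.drop_eq_getElem_cons hi0]
    simp only [List.getElem_dropLast]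
    have harg1 : ∀ (d : Char) (r : List Char),
        cs.dropLast.drop (i + 1) = '-' :: d :: r → False := by
      intro d r hdr
      have hlen2 : i + 1 < cs.dropLast.length := by
        by_contra hc
        rw [List.drop_eq_nil_of_le (by omega)] at hdr
        simp at hdr
      have hlen3 := congrArg List.length hdr
      simp only [List.length_drop, List.length_cons] at hlen3
      have hhead : cs.dropLast[i + 1]'hlen2 = '-' := by
        rw [List.drop_eq_getElem_cons hlen2] at hdr
        injection hdr with ha _
      apply hn2
      refine ⟨by omega, ?_⟩
      rw [List.getD_eq_getElem _ _ (show i + 1 < cs.length by omega),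
          ← List.getElem_dropLast hlen2]
      exact hhead
    have harg2 : ∀ (e : Char) (r : List Char),
        cs[i]'(by omega) = '\\' → cs.dropLast.drop (i + 1) = e :: r → False := by
      intro e r hc hdr
      have hlen2 : i + 1 < cs.dropLast.length := by
        by_contra hcon
        rw [List.drop_eq_nil_of_le (by omega)] at hdr
        simp at hdr
      exact hn3 ⟨by rw [List.getD_eq_getElem _ _ (show i < cs.length by omega)]; exact hc,
        by omega⟩
    rw [tokenize.eq_3 _ _ harg1 harg2,
        List.getD_eq_getElem _ _ (show i < cs.length by omega)]
    simp only [List.any_cons]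
    rw [lit_step]
  | case4 i m h1 =>
    have hnil : cs.dropLast.drop i = [] := by
      apply List.drop_eq_nil_of_le
      omega
    rw [hnil]
    simp [tokenize]

theorem main_eq (atom char : String) :
    match_char_class_py atom char = match_char_class_py_alt atom char := by
  have hdl : atom.toList.dropLast.length = atom.toList.length - 1 := by simp
  have hb : (atom.toList.drop 1).dropLast = atom.toList.dropLast.drop 1 := by
    simp only [List.dropLast_eq_take, List.drop_take, List.length_drop]
  simp only [match_char_class_py, match_char_class_py_alt]
  rw [hb]
  by_cases hneg : 2 < atom.toList.length ∧ atom.toList.getD 1 ' ' = '^'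
  · rw [if_pos hneg]
    obtain ⟨hl, hc⟩ := hneg
    have h1 : 1 < atom.toList.dropLast.length := by omega
    have hdrop : atom.toList.dropLast.drop 1 = '^' :: atom.toList.dropLast.drop 2 := by
      rw [List.drop_eq_getElem_cons h1]
      have hg : atom.toList.dropLast[1]'h1 = '^' := by
        rw [List.getElem_dropLast,
            ← List.getD_eq_getElem _ ' ' (show 1 < atom.toList.length by omega)]
        exact hc
      rw [hg]
    rw [hdrop,
        show PySem.Chars.startswith ('^' :: atom.toList.dropLast.drop 2) ['^'] = true from
          by simp [PySem.Chars.startswith, List.isPrefixOf],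
        loop_eq_any]
    simp
  · rw [if_neg hneg]
    have hsw : PySem.Chars.startswith (atom.toList.dropLast.drop 1) ['^'] = false := by
      cases h2 : atom.toList.dropLast.drop 1 with
      | nil => simp [PySem.Chars.startswith, List.isPrefixOf]
      | cons c r =>
        have h1 : 1 < atom.toList.dropLast.length := by
          by_contra hcon
          rw [List.drop_eq_nil_of_le (by omega)] at h2
          simp at h2
        have hcg : c = atom.toList[1]'(by omega) := by
          rw [List.drop_eq_getElem_cons h1] at h2
          injection h2 with ha _
          rw [← ha, List.getElem_dropLast]
        have hne : c ≠ '^' := by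
          intro hcc
          apply hneg
          refine ⟨by omega, ?_⟩
          rw [List.getD_eq_getElem _ _ (show 1 < atom.toList.length by omega), ← hcg]
          exact hcc
        simp [PySem.Chars.startswith, List.isPrefixOf, Ne.symm hne]
    rw [hsw, loop_eq_any]
    simp

-- ===== VERDICT (by name: the statement is the Claim_ definition above) =====
theorem match_char_class_py_spec : Claim_equal_match_char_class_py := by
  intro atom char _
  unfold Spec_match_char_class_py
  exact main_eq atom char
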